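-- pv_equiv track=rewrite | github.com/brianjwalters/entity-extraction-service | src/core/prompts/dynamic_prompt_builder.py | _cluster_entities_by_domain
-- ===== SOURCE A (Python) =====
-- from typing import Dict, List, Optional, Any, Union
--
-- def _cluster_entities_by_domain(entity_types: List[str]) -> Dict[str, List[str]]:
--     """
--     Group entity types by legal domain for better prompt organization.
--     """
--     clusters = {
--         "Core Legal Entities": [],
--         "Citations & References": [],
--         "Court & Procedural": [],
--         "Financial & Temporal": [],
--         "Parties & Organizations": [],
--         "Other Entities": []
--     }
--
--     # Define clustering rules based on entity type names
--     for entity_type in entity_types: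
--         if any(term in entity_type.upper() for term in ["CITATION", "USC", "CFR", "STATUTE"]):
--             clusters["Citations & References"].append(entity_type)
--         elif any(term in entity_type.upper() for term in ["COURT", "JUDGE", "MOTION", "BRIEF"]):
--             clusters["Court & Procedural"].append(entity_type)
--         elif any(term in entity_type.upper() for term in ["PARTY", "ATTORNEY", "PLAINTIFF", "DEFENDANT"]):
--             clusters["Core Legal Entities"].append(entity_type)
--         elif any(term in entity_type.upper() for term in ["MONETARY", "DATE", "DEADLINE", "AMOUNT"]):
--             clusters["Financial & Temporal"].append(entity_type)
--         elif any(term in entity_type.upper() for term in ["ORGANIZATION", "FIRM", "AGENCY", "CORPORATION"]):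
--             clusters["Parties & Organizations"].append(entity_type)
--         else:
--             clusters["Other Entities"].append(entity_type)
--
--     # Remove empty clusters
--     return {k: v for k, v in clusters.items() if v}
-- ===== SOURCE B (Python) =====
-- RULES = [
--     ("Citations & References", ("CITATION", "USC", "CFR", "STATUTE")),
--     ("Court & Procedural", ("COURT", "JUDGE", "MOTION", "BRIEF")),
--     ("Core Legal Entities", ("PARTY", "ATTORNEY", "PLAINTIFF", "DEFENDANT")),
--     ("Financial & Temporal", ("MONETARY", "DATE", "DEADLINE", "AMOUNT")),
--     ("Parties & Organizations", ("ORGANIZATION", "FIRM", "AGENCY", "CORPORATION")),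
-- ]
--
-- CLUSTER_ORDER = [
--     "Core Legal Entities",
--     "Citations & References",
--     "Court & Procedural",
--     "Financial & Temporal",
--     "Parties & Organizations",
--     "Other Entities",
-- ]
--
--
-- def _classify(entity_type):
--     up = entity_type.upper()
--     return next((name for name, terms in RULES if any(t in up for t in terms)),
--                 "Other Entities")
--
--
-- def _cluster_entities_by_domain(entity_types):
--     labeled = [(_classify(e), e) for e in entity_types]
--     return {name: members
--             for name in CLUSTER_ORDER
--             if (members := [e for lbl, e in labeled if lbl == name])}
-- ===== Notes on version B (the rewrite author's own statement) =====
-- stated objective: idiomatic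
-- what changed: Replaces A's single-pass elif chain appending into a pre-built dict by a declarative rule table with a classifier function and a per-cluster group-by comprehension over a fixed cluster order.
import Mathlib
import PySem

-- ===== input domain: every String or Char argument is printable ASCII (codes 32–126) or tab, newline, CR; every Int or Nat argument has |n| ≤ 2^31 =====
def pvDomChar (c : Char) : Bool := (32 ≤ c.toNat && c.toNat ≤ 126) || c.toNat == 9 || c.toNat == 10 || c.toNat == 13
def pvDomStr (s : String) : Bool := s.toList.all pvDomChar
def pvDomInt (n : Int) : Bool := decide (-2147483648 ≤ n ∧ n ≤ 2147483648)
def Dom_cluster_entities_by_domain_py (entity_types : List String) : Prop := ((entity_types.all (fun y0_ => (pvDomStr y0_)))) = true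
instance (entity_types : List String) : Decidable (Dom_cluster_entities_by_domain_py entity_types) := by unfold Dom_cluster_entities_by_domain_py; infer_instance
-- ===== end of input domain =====

-- B replaces A's single-pass dict-append elif chain by a table of rules, a classifier
-- function and a per-cluster group-by comprehension (objective: idiomatic).

-- ===== PORT A =====
-- clusters[k].append(v) on the fixed-key dict (all six keys present, distinct)
def pvDictAppend (d : List (String × List String)) (k : String) (v : String) :
    List (String × List String) :=
  d.map (fun kv => if kv.1 = k then (kv.1, kv.2 ++ [v]) else kv)

def pvInitClusters : List (String × List String) :=
  [("Core Legal Entities", []), ("Citations & References", []), ("Court & Procedural", []),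
   ("Financial & Temporal", []), ("Parties & Organizations", []), ("Other Entities", [])]

def pvStepA (d : List (String × List String)) (e : String) : List (String × List String) :=
  if ["CITATION", "USC", "CFR", "STATUTE"].any
      (fun t => PySem.Str.isIn t (PySem.Str.upper e)) then
    pvDictAppend d "Citations & References" e
  else if ["COURT", "JUDGE", "MOTION", "BRIEF"].any
      (fun t => PySem.Str.isIn t (PySem.Str.upper e)) then
    pvDictAppend d "Court & Procedural" e
  else if ["PARTY", "ATTORNEY", "PLAINTIFF", "DEFENDANT"].any
      (fun t => PySem.Str.isIn t (PySem.Str.upper e)) then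
    pvDictAppend d "Core Legal Entities" e
  else if ["MONETARY", "DATE", "DEADLINE", "AMOUNT"].any
      (fun t => PySem.Str.isIn t (PySem.Str.upper e)) then
    pvDictAppend d "Financial & Temporal" e
  else if ["ORGANIZATION", "FIRM", "AGENCY", "CORPORATION"].any
      (fun t => PySem.Str.isIn t (PySem.Str.upper e)) then
    pvDictAppend d "Parties & Organizations" e
  else
    pvDictAppend d "Other Entities" e

def cluster_entities_by_domain_py (entity_types : List String) : List (String × List String) :=
  (entity_types.foldl pvStepA pvInitClusters).filter (fun kv => !kv.2.isEmpty)

-- ===== PORT B =====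
def pvRules : List (String × List String) :=
  [("Citations & References", ["CITATION", "USC", "CFR", "STATUTE"]),
   ("Court & Procedural", ["COURT", "JUDGE", "MOTION", "BRIEF"]),
   ("Core Legal Entities", ["PARTY", "ATTORNEY", "PLAINTIFF", "DEFENDANT"]),
   ("Financial & Temporal", ["MONETARY", "DATE", "DEADLINE", "AMOUNT"]),
   ("Parties & Organizations", ["ORGANIZATION", "FIRM", "AGENCY", "CORPORATION"])]

def pvClusterOrder : List String :=
  ["Core Legal Entities", "Citations & References", "Court & Procedural",
   "Financial & Temporal", "Parties & Organizations", "Other Entities"]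

def pvClassify (e : String) : String :=
  let up := PySem.Str.upper e
  match pvRules.find? (fun r => r.2.any (fun t => PySem.Str.isIn t up)) with
  | some r => r.1
  | none => "Other Entities"

def cluster_entities_by_domain_py_alt (entity_types : List String) :
    List (String × List String) :=
  let labeled := entity_types.map (fun e => (pvClassify e, e))
  pvClusterOrder.filterMap (fun name =>
    let members := (labeled.filter (fun p => p.1 == name)).map Prod.snd
    if members.isEmpty then none else some (name, members))

-- ===== PRECONDITION & SPEC =====
def Spec_cluster_entities_by_domain_py (entity_types : List String) (out : List (String × List String)) : Prop := out = cluster_entities_by_domain_py_alt entity_types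
instance (entity_types : List String) (out : List (String × List String)) : Decidable (Spec_cluster_entities_by_domain_py entity_types out) := by unfold Spec_cluster_entities_by_domain_py; infer_instance

-- ===== CLAIM (what is proved, stated in full; the proofs are below) =====
def Claim_equal_cluster_entities_by_domain_py : Prop := ∀ (entity_types : List String), Dom_cluster_entities_by_domain_py entity_types → Spec_cluster_entities_by_domain_py entity_types (cluster_entities_by_domain_py entity_types)

-- ===== LEMMAS AND PROOFS =====

-- A's elif chain picks exactly the cluster name B's classifier computes
theorem pvStepA_eq (d : List (String × List String)) (e : String) :
    pvStepA d e = pvDictAppend d (pvClassify e) e := by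
  unfold pvStepA pvClassify pvRules
  simp only [List.find?, List.any_cons, List.any_nil, Bool.or_false]
  split_ifs <;> simp only [Bool.not_eq_true] at * <;> simp only [*]

-- one slot of the dict after one loop step, against the filter description
theorem pvSlot (n e : String) (a l : List String) :
    (if n = pvClassify e then a ++ [e] else a) ++
        l.filter (fun x => pvClassify x == n)
      = a ++ (e :: l).filter (fun x => pvClassify x == n) := by
  by_cases h : pvClassify e = n
  · subst h; simp
  · simp [h, Ne.symm h]

theorem pvInv (l : List String) (a1 a2 a3 a4 a5 a6 : List String) :
    l.foldl (fun d e => pvDictAppend d (pvClassify e) e)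
      [("Core Legal Entities", a1), ("Citations & References", a2),
       ("Court & Procedural", a3), ("Financial & Temporal", a4),
       ("Parties & Organizations", a5), ("Other Entities", a6)]
    = [("Core Legal Entities", a1 ++ l.filter (fun x => pvClassify x == "Core Legal Entities")),
       ("Citations & References", a2 ++ l.filter (fun x => pvClassify x == "Citations & References")),
       ("Court & Procedural", a3 ++ l.filter (fun x => pvClassify x == "Court & Procedural")),
       ("Financial & Temporal", a4 ++ l.filter (fun x => pvClassify x == "Financial & Temporal")),
       ("Parties & Organizations", a5 ++ l.filter (fun x => pvClassify x == "Parties & Organizations")),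
       ("Other Entities", a6 ++ l.filter (fun x => pvClassify x == "Other Entities"))] := by
  induction l generalizing a1 a2 a3 a4 a5 a6 with
  | nil => simp
  | cons e l ih =>
    have hp : ∀ (k : String) (c : Prop) [Decidable c] (x y : List String),
        (if c then (k, x) else (k, y)) = (k, if c then x else y) := by
      intro k c _ x y; split_ifs <;> rfl
    have hstep : pvDictAppend
        [("Core Legal Entities", a1), ("Citations & References", a2),
         ("Court & Procedural", a3), ("Financial & Temporal", a4),
         ("Parties & Organizations", a5), ("Other Entities", a6)] (pvClassify e) e
      = [("Core Legal Entities", if "Core Legal Entities" = pvClassify e then a1 ++ [e] else a1),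
         ("Citations & References", if "Citations & References" = pvClassify e then a2 ++ [e] else a2),
         ("Court & Procedural", if "Court & Procedural" = pvClassify e then a3 ++ [e] else a3),
         ("Financial & Temporal", if "Financial & Temporal" = pvClassify e then a4 ++ [e] else a4),
         ("Parties & Organizations", if "Parties & Organizations" = pvClassify e then a5 ++ [e] else a5),
         ("Other Entities", if "Other Entities" = pvClassify e then a6 ++ [e] else a6)] := by
      simp only [pvDictAppend, List.map, hp]
    rw [List.foldl_cons, hstep, ih]
    simp only [pvSlot]

-- labels-then-project equals filtering by the classifier
theorem pvSel (n : String) (l : List String) :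
    ((l.map (fun e => (pvClassify e, e))).filter (fun p => p.1 == n)).map Prod.snd
      = l.filter (fun x => pvClassify x == n) := by
  induction l with
  | nil => rfl
  | cons e l ih =>
    by_cases h : pvClassify e = n <;> simp [h, ih]

-- keep-if-nonempty over labelled clusters, filter vs filterMap
theorem pvLast (names : List String) (g : String → List String) :
    (names.map (fun n => (n, g n))).filter (fun kv => !kv.2.isEmpty)
      = names.filterMap (fun n => if (g n).isEmpty then none else some (n, g n)) := by
  induction names with
  | nil => rfl
  | cons n ns ih =>
    rw [List.map_cons, List.filter_cons, List.filterMap_cons]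
    cases h : (g n).isEmpty <;> simp_all

-- ===== VERDICT (by name: the statement is the Claim_ definition above) =====
theorem cluster_entities_by_domain_py_spec : Claim_equal_cluster_entities_by_domain_py := by
  intro l _
  show cluster_entities_by_domain_py l = cluster_entities_by_domain_py_alt l
  simp only [cluster_entities_by_domain_py, cluster_entities_by_domain_py_alt]
  have hcongr := PySem.List.foldl_congr_mem (l := l) pvStepA
    (fun d e => pvDictAppend d (pvClassify e) e) pvInitClusters
    (fun d e _ => pvStepA_eq d e)
  rw [hcongr]
  unfold pvInitClusters
  rw [pvInv]
  simp only [List.nil_append, pvSel]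
  exact pvLast pvClusterOrder (fun n => l.filter (fun x => pvClassify x == n))
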